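-- pv_equiv track=rewrite | github.com/LESSEN-Project/Generate_then_Refine | script/04refiner_eval_acc.py | data_to_dic
-- ===== SOURCE A (Python) =====
-- def data_to_dic(list_of_uts, list_of_intent, test_intent_list):
--     data_dic = dict()
--     for intent, ut in zip(list_of_intent, list_of_uts):
--         if intent in test_intent_list:
--             if intent not in data_dic:
--                 data_dic[intent] = [ut]
--             else:
--                 data_dic[intent].append(ut)
--     return  data_dic
-- ===== SOURCE B (Python) =====
-- def data_to_dic(list_of_uts, list_of_intent, test_intent_list):
--     pairs = list(zip(list_of_intent, list_of_uts))
--     return {intent: [ut for i, ut in pairs if i == intent]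
--             for intent in dict.fromkeys(i for i, _ in pairs)
--             if intent in test_intent_list}
-- ===== Notes on version B (the rewrite author's own statement) =====
-- stated objective: alternative
-- what changed: B inverts the loop nesting: instead of one pass over the data updating a dict, it iterates over the distinct intents (in first-occurrence order) that are test intents and gathers each intent's utterances with a scan of the zipped data.
import Mathlib
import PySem

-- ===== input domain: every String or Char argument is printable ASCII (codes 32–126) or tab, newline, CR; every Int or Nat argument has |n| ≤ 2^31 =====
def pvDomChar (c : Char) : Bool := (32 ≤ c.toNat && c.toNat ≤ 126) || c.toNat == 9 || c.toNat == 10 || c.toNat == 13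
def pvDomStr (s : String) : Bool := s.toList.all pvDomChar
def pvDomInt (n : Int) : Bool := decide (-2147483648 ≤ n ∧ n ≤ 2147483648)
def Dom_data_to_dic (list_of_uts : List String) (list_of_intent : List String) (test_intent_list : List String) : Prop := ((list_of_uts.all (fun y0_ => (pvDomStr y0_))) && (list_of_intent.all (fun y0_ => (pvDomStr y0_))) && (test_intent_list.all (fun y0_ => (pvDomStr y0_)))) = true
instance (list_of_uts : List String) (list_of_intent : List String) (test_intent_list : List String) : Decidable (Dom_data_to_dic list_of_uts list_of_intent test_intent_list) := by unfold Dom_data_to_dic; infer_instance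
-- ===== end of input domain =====

-- B inverts the loop nesting (iterate over distinct test intents, inner scan of the data)
-- instead of A's single data pass updating a dict; objective: alternative decomposition.

-- ===== PORT A =====
-- one iteration of A's loop body (d[intent] = [ut] / d[intent].append(ut))
def pvStepA (test_intent_list : List String) (d : PySem.Dict String (List String))
    (p : String × String) : PySem.Dict String (List String) :=
  if test_intent_list.contains p.1 then
    if d.contains p.1 = false then d.insert p.1 [p.2]
    else d.insert p.1 (d.getD p.1 [] ++ [p.2])
  else d

def data_to_dic (list_of_uts : List String) (list_of_intent : List String) (test_intent_list : List String) : List (String × List String) :=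
  ((list_of_intent.zip list_of_uts).foldl (pvStepA test_intent_list) PySem.Dict.empty).items

-- ===== PORT B =====
-- [ut for i, ut in pairs if i == intent]
def pvGroup (pairs : List (String × String)) (intent : String) : List String :=
  (pairs.filter (fun p => p.1 == intent)).map (·.2)

def data_to_dic_alt (list_of_uts : List String) (list_of_intent : List String) (test_intent_list : List String) : List (String × List String) :=
  let pairs := list_of_intent.zip list_of_uts
  ((PySem.List.dedup (pairs.map Prod.fst)).filter
      (fun intent => test_intent_list.contains intent)).map
    (fun intent => (intent, pvGroup pairs intent))

-- ===== PRECONDITION & SPEC =====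
def Spec_data_to_dic (list_of_uts : List String) (list_of_intent : List String) (test_intent_list : List String) (out : List (String × List String)) : Prop := out = data_to_dic_alt list_of_uts list_of_intent test_intent_list
instance (list_of_uts : List String) (list_of_intent : List String) (test_intent_list : List String) (out : List (String × List String)) : Decidable (Spec_data_to_dic list_of_uts list_of_intent test_intent_list out) := by unfold Spec_data_to_dic; infer_instance

-- ===== CLAIM (what is proved, stated in full; the proofs are below) =====
def Claim_equal_data_to_dic : Prop := ∀ (list_of_uts : List String) (list_of_intent : List String) (test_intent_list : List String), Dom_data_to_dic list_of_uts list_of_intent test_intent_list → Spec_data_to_dic list_of_uts list_of_intent test_intent_list (data_to_dic list_of_uts list_of_intent test_intent_list)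

-- ===== LEMMAS AND PROOFS =====

lemma pvGroup_append (ps : List (String × String)) (p : String × String) (i : String) :
    pvGroup (ps ++ [p]) i = pvGroup ps i ++ (if p.1 == i then [p.2] else []) := by
  simp only [pvGroup, List.filter_append, List.map_append, List.filter_cons, List.filter_nil]
  by_cases h : p.1 == i <;> simp [h]

lemma pvGroup_nil_of_not_mem (ps : List (String × String)) (i : String)
    (h : i ∉ ps.map Prod.fst) : pvGroup ps i = [] := by
  simp only [pvGroup, List.map_eq_nil_iff, List.filter_eq_nil_iff]
  intro p hp hpi
  exact h (List.mem_map.mpr ⟨p, hp, by simpa using hpi⟩)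

-- the central invariant: A's dict after the whole loop, as an items list
lemma pvMain (test : List String) (pairs : List (String × String)) :
    (pairs.foldl (pvStepA test) PySem.Dict.empty).items =
    ((PySem.Set.ofList (pairs.map Prod.fst)).filter (fun i => test.contains i)).map
      (fun i => (i, pvGroup pairs i)) := by
  induction pairs using List.reverseRecOn with
  | nil => rfl
  | append_singleton ps p ih =>
    rw [List.foldl_append]
    set d := ps.foldl (pvStepA test) PySem.Dict.empty with hd
    have hkeys : d.keys = (PySem.Set.ofList (ps.map Prod.fst)).filter (fun i => test.contains i) := by
      simp only [PySem.Dict.keys, ih, List.map_map]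
      simp [Function.comp_def]
    have hnd : d.keys.Nodup := by
      rw [hkeys]; exact (PySem.Set.nodup_ofList _).filter _
    have hcont : d.contains p.1 =
        ((p.1 ∈ ps.map Prod.fst) && test.contains p.1) := by
      rw [PySem.Dict.contains_eq_decide_mem_keys, hkeys]
      by_cases h1 : p.1 ∈ List.map Prod.fst ps <;> by_cases h2 : p.1 ∈ test <;>
        simp [List.mem_filter, PySem.Set.mem_ofList, h1, h2]
    simp only [List.map_append, List.map_cons, List.map_nil]
    rw [PySem.Set.ofList_append_singleton]
    simp only [List.foldl_cons, List.foldl_nil]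
    by_cases htest : test.contains p.1
    · by_cases hmem : p.1 ∈ ps.map Prod.fst
      · -- existing key: append to its list
        have hc : d.contains p.1 = true := by rw [hcont, htest]; simp [hmem]
        have hitem : (p.1, pvGroup ps p.1) ∈ d.items := by
          rw [ih]
          exact List.mem_map.mpr ⟨p.1, List.mem_filter.mpr
            ⟨(PySem.Set.mem_ofList _ _).mpr hmem, htest⟩, rfl⟩
        have hg : d.getD p.1 [] = pvGroup ps p.1 :=
          PySem.Dict.getD_of_mem_items d hitem hnd []
        simp only [pvStepA, htest, if_true, hc, Bool.true_eq_false, if_false]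
        rw [PySem.Dict.items_insert_of_contains d _ hc, ih, hg,
          PySem.Set.add_of_mem (((PySem.Set.mem_ofList _ _).mpr hmem)), List.map_map]
        apply List.map_congr_left
        intro i _
        by_cases hip : i = p.1
        · subst hip; simp [pvGroup_append]
        · have : (p.1 == i) = false := by simp [Ne.symm hip]
          simp [hip, pvGroup_append, this]
      · -- fresh key: appended at the end
        have hc : d.contains p.1 = false := by rw [hcont]; simp [hmem]
        simp only [pvStepA, htest, if_true, hc, if_true]
        rw [PySem.Dict.items_insert_of_not_contains d _ hc, ih,
          PySem.Set.add_of_not_mem (fun h => hmem ((PySem.Set.mem_ofList _ _).mp h)),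
          List.filter_append, List.map_append]
        congr 1
        · apply List.map_congr_left
          intro i hi
          have hiK : i ∈ ps.map Prod.fst :=
            (PySem.Set.mem_ofList _ _).mp (List.mem_filter.mp hi).1
          have : (p.1 == i) = false := by
            simp only [beq_eq_false_iff_ne]; rintro rfl; exact hmem hiK
          simp [pvGroup_append, this]
        · simp only [List.filter_cons, htest]
          simp [pvGroup_append, pvGroup_nil_of_not_mem ps p.1 hmem]
    · -- intent not in test_intent_list: dict unchanged, key filtered out
      have hf : test.contains p.1 = false := by simpa using htest
      simp only [pvStepA, hf, Bool.false_eq_true, if_false]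
      rw [PySem.Set.add_eq_ite]
      by_cases hmem : p.1 ∈ PySem.Set.ofList (ps.map Prod.fst)
      · simp only [hmem, if_true, ih]
        apply List.map_congr_left
        intro i hi
        have hit : test.contains i = true := by simpa using (List.mem_filter.mp hi).2
        have : (p.1 == i) = false := by
          simp only [beq_eq_false_iff_ne]; rintro rfl
          exact htest (by simpa using hit)
        simp [pvGroup_append, this]
      · simp only [hmem, if_false, List.filter_append, List.filter_cons, hf,
          Bool.false_eq_true, List.filter_nil, List.append_nil, ih]
        apply List.map_congr_left
        intro i hi
        have hit : test.contains i = true := by simpa using (List.mem_filter.mp hi).2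
        have : (p.1 == i) = false := by
          simp only [beq_eq_false_iff_ne]; rintro rfl
          exact htest (by simpa using hit)
        simp [pvGroup_append, this]

-- ===== VERDICT (by name: the statement is the Claim_ definition above) =====
theorem data_to_dic_spec : Claim_equal_data_to_dic := by
  intro uts intents test _
  unfold Spec_data_to_dic data_to_dic data_to_dic_alt
  simpa using pvMain test (intents.zip uts)
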